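-- pv_equiv track=rewrite | github.com/edfornieles/Orpheus | src/enhanced_voice_server_optimized.py | add_vocal_characteristic_tags
-- ===== SOURCE A (Python) =====
-- def add_vocal_characteristic_tags(text, vocal_characteristics):
--     """Add vocal characteristic tags for Orpheus processing"""
--     enhanced_text = text
--
--     # Map vocal characteristics to Orpheus tags
--     characteristic_tags = {
--         'raspy_edge': '<groan>',
--         'ethereal_softness': '<sigh>',
--         'commanding_presence': '',  # Use natural authority
--         'playful_energy': '<chuckle>',
--         'seductive_warmth': '<gasp>',
--         'theatrical_projection': '',  # Use natural projection
--         'hypnotic_quality': '<yawn>',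
--         'mysterious_depth': '<sigh>'
--     }
--
--     # Apply relevant tags based on characteristics
--     for characteristic in vocal_characteristics:
--         if characteristic in characteristic_tags and characteristic_tags[characteristic]:
--             tag = characteristic_tags[characteristic]
--             # Add tag occasionally, not to every sentence
--             if len(enhanced_text.split('.')) > 1:
--                 sentences = enhanced_text.split('.')
--                 if len(sentences) > 1:
--                     sentences[1] = tag + ' ' + sentences[1]
--                     enhanced_text = '.'.join(sentences)
--
--     return enhanced_text
-- ===== SOURCE B (Python) =====
-- def add_vocal_characteristic_tags(text, vocal_characteristics):
--     """Add vocal characteristic tags for Orpheus processing (collect-then-insert-once)"""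
--     characteristic_tags = {
--         'raspy_edge': '<groan>',
--         'ethereal_softness': '<sigh>',
--         'commanding_presence': '',
--         'playful_energy': '<chuckle>',
--         'seductive_warmth': '<gasp>',
--         'theatrical_projection': '',
--         'hypnotic_quality': '<yawn>',
--         'mysterious_depth': '<sigh>',
--     }
--     tags = [characteristic_tags[c] for c in vocal_characteristics
--             if c in characteristic_tags and characteristic_tags[c]]
--     if not tags:
--         return text
--     sentences = text.split('.')
--     if len(sentences) <= 1:
--         return text
--     sentences[1] = ' '.join(reversed(tags)) + ' ' + sentences[1]
--     return '.'.join(sentences)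
-- ===== Notes on version B (the rewrite author's own statement) =====
-- stated objective: simpler
-- what changed: A re-splits and re-joins the whole text once per matching characteristic; B collects the applicable tags in one pass and then splits the original text once, prepending the reversed joined tags to the second sentence in a single transformation.
import Mathlib
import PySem

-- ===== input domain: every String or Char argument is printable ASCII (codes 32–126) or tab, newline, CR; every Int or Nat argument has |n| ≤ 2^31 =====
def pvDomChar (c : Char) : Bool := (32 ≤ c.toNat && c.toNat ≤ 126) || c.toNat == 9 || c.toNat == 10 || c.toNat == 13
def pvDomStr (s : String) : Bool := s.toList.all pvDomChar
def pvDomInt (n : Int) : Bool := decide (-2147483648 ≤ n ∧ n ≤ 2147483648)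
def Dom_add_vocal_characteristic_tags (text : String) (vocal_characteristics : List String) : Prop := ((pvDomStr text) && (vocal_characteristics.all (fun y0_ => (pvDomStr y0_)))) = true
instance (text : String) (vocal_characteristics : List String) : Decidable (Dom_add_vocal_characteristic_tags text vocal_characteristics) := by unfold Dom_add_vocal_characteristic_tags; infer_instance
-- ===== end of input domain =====

-- B collects the applicable tags in one pass, then splits the text once and prepends all tags
-- to the second sentence in a single transformation (A re-splits/re-joins once per tag).


-- ===== PORT A =====
-- the dict literal `characteristic_tags` (shared verbatim by both Pythons)
def pvTagDict : PySem.Dict String String := PySem.Dict.ofList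
  [("raspy_edge", "<groan>"), ("ethereal_softness", "<sigh>"), ("commanding_presence", ""),
   ("playful_energy", "<chuckle>"), ("seductive_warmth", "<gasp>"), ("theatrical_projection", ""),
   ("hypnotic_quality", "<yawn>"), ("mysterious_depth", "<sigh>")]

-- one iteration of A's `for characteristic in vocal_characteristics` loop, on the code points
def pvStepA (e : List Char) (c : String) : List Char :=
  if pvTagDict.contains c && decide (pvTagDict.getD c "" ≠ "") then
    if (PySem.Chars.splitOn e ['.']).length > 1 then
      if (PySem.Chars.splitOn e ['.']).length > 1 then
        PySem.Chars.join ['.']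
          ((PySem.Chars.splitOn e ['.']).set 1
            ((pvTagDict.getD c "").toList ++ ' ' :: PySem.List.pyGetD (PySem.Chars.splitOn e ['.']) 1 []))
      else e
    else e
  else e

def add_vocal_characteristic_tags (text : String) (vocal_characteristics : List String) : String :=
  String.ofList (vocal_characteristics.foldl pvStepA text.toList)

-- ===== PORT B =====
def add_vocal_characteristic_tags_alt (text : String) (vocal_characteristics : List String) : String :=
  if (vocal_characteristics.filter
        (fun c => pvTagDict.contains c && decide (pvTagDict.getD c "" ≠ ""))).map
        (fun c => (pvTagDict.getD c "").toList) = [] then text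
  else if (PySem.Chars.splitOn text.toList ['.']).length ≤ 1 then text
  else
    String.ofList (PySem.Chars.join ['.']
      ((PySem.Chars.splitOn text.toList ['.']).set 1
        (PySem.Chars.join [' ']
            (((vocal_characteristics.filter
                (fun c => pvTagDict.contains c && decide (pvTagDict.getD c "" ≠ ""))).map
                (fun c => (pvTagDict.getD c "").toList)).reverse)
          ++ ' ' :: PySem.List.pyGetD (PySem.Chars.splitOn text.toList ['.']) 1 [])))

-- ===== PRECONDITION & SPEC =====
def Spec_add_vocal_characteristic_tags (text : String) (vocal_characteristics : List String) (out : String) : Prop := out = add_vocal_characteristic_tags_alt text vocal_characteristics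
instance (text : String) (vocal_characteristics : List String) (out : String) : Decidable (Spec_add_vocal_characteristic_tags text vocal_characteristics out) := by unfold Spec_add_vocal_characteristic_tags; infer_instance

-- ===== CLAIM (what is proved, stated in full; the proofs are below) =====
def Claim_equal_add_vocal_characteristic_tags : Prop := ∀ (text : String) (vocal_characteristics : List String), Dom_add_vocal_characteristic_tags text vocal_characteristics → Spec_add_vocal_characteristic_tags text vocal_characteristics (add_vocal_characteristic_tags text vocal_characteristics)

-- ===== LEMMAS AND PROOFS =====

-- a simple structural '.'-splitter used only to reason about PySem.Chars.splitOn
def pvConsHead (pre : List Char) : List (List Char) → List (List Char)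
  | [] => [pre]
  | h :: t => (pre ++ h) :: t

def pvSplit : List Char → List (List Char)
  | [] => [[]]
  | c :: l => if c = '.' then [] :: pvSplit l else pvConsHead [c] (pvSplit l)

theorem pvConsHead_consHead (a b : List Char) (m : List (List Char)) :
    pvConsHead a (pvConsHead b m) = pvConsHead (a ++ b) m := by
  cases m <;> simp [pvConsHead]

theorem pvGo_nil (fuel : Nat) (cur : List Char) (acc : List (List Char)) :
    PySem.Chars.splitOn.go ['.'] fuel [] cur acc = (cur.reverse :: acc).reverse := by
  cases fuel <;> simp [PySem.Chars.splitOn.go]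

theorem pvGo_dot (fuel : Nat) (l cur : List Char) (acc : List (List Char)) :
    PySem.Chars.splitOn.go ['.'] (fuel + 1) ('.' :: l) cur acc
      = PySem.Chars.splitOn.go ['.'] fuel l [] (cur.reverse :: acc) := by
  simp [PySem.Chars.splitOn.go, List.isPrefixOf]

theorem pvGo_nodot (fuel : Nat) (c : Char) (hc : c ≠ '.') (l cur : List Char)
    (acc : List (List Char)) :
    PySem.Chars.splitOn.go ['.'] (fuel + 1) (c :: l) cur acc
      = PySem.Chars.splitOn.go ['.'] fuel l (c :: cur) acc := by
  simp [PySem.Chars.splitOn.go, List.isPrefixOf, Ne.symm hc]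

theorem pvSplit_ne_nil (l : List Char) : pvSplit l ≠ [] := by
  cases l with
  | nil => simp [pvSplit]
  | cons c l =>
    by_cases hc : c = '.' <;> cases hs : pvSplit l <;> simp [pvSplit, hc, pvConsHead, hs]

theorem pvGo_eq_pvSplit (l : List Char) (fuel : Nat) (h : l.length ≤ fuel)
    (cur : List Char) (acc : List (List Char)) :
    PySem.Chars.splitOn.go ['.'] fuel l cur acc
      = acc.reverse ++ pvConsHead cur.reverse (pvSplit l) := by
  induction l generalizing fuel cur acc with
  | nil => simp [pvGo_nil, pvSplit, pvConsHead]
  | cons c l ih =>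
    cases fuel with
    | zero => simp at h
    | succ f =>
      by_cases hc : c = '.'
      · subst hc
        rw [pvGo_dot, ih f (by simpa using h)]
        cases hs : pvSplit l with
        | nil => exact absurd hs (pvSplit_ne_nil l)
        | cons x t => simp [pvSplit, pvConsHead, hs]
      · rw [pvGo_nodot f c hc, ih f (by simpa using h)]
        simp [pvSplit, hc, pvConsHead_consHead]

theorem pvSplitOn_eq_pvSplit (l : List Char) :
    PySem.Chars.splitOn l ['.'] = pvSplit l := by
  rw [PySem.Chars.splitOn, pvGo_eq_pvSplit l (l.length + 1) (by omega)]
  cases hs : pvSplit l with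
  | nil => exact absurd hs (pvSplit_ne_nil l)
  | cons h t => simp [pvConsHead]

theorem pvSplit_nodot (l : List Char) : ∀ x ∈ pvSplit l, '.' ∉ x := by
  induction l with
  | nil => simp [pvSplit]
  | cons c l ih =>
    intro x hx
    by_cases hc : c = '.'
    · rw [pvSplit, if_pos hc] at hx
      rcases List.mem_cons.mp hx with rfl | hx
      · simp
      · exact ih x hx
    · rw [pvSplit, if_neg hc] at hx
      cases hs : pvSplit l with
      | nil => exact absurd hs (pvSplit_ne_nil l)
      | cons h t =>
        rw [hs, pvConsHead] at hx
        rcases List.mem_cons.mp hx with heq | hx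
        · rw [heq]
          simp only [List.cons_append, List.nil_append, List.mem_cons]
          rintro (h' | h')
          · exact hc h'.symm
          · exact ih h (by rw [hs]; exact List.mem_cons_self) h'
        · exact ih x (by rw [hs]; exact List.mem_cons_of_mem _ hx)

theorem pvJoin_pvSplit (l : List Char) : PySem.Chars.join ['.'] (pvSplit l) = l := by
  induction l with
  | nil => simp [pvSplit, PySem.Chars.join, List.intercalate]
  | cons c l ih =>
    by_cases hc : c = '.'
    · cases hs : pvSplit l with
      | nil => exact absurd hs (pvSplit_ne_nil l)
      | cons h t =>
        subst hc
        rw [pvSplit, if_pos rfl]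
        rw [hs] at ih ⊢
        simpa [PySem.Chars.join, List.intercalate] using ih
    · cases hs : pvSplit l with
      | nil => exact absurd hs (pvSplit_ne_nil l)
      | cons h t =>
        rw [pvSplit, if_neg hc, hs, pvConsHead]
        rw [hs] at ih
        cases t <;> simpa [PySem.Chars.join, List.intercalate] using congrArg (c :: ·) ih

theorem pvSplit_append_nodot (p l : List Char) (hp : '.' ∉ p) :
    pvSplit (p ++ l) = pvConsHead p (pvSplit l) := by
  induction p with
  | nil =>
    cases hs : pvSplit l with
    | nil => exact absurd hs (pvSplit_ne_nil l)
    | cons h t => rw [List.nil_append, hs, pvConsHead, List.nil_append]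
  | cons c p ih =>
    have hc : c ≠ '.' := fun h => hp (h ▸ List.mem_cons_self)
    have hp' : '.' ∉ p := fun h => hp (List.mem_cons_of_mem _ h)
    show pvSplit (c :: (p ++ l)) = pvConsHead (c :: p) (pvSplit l)
    rw [pvSplit, if_neg hc, ih hp', pvConsHead_consHead]
    rfl

theorem pvSplit_join (parts : List (List Char)) (hne : parts ≠ [])
    (hnd : ∀ x ∈ parts, '.' ∉ x) :
    pvSplit (PySem.Chars.join ['.'] parts) = parts := by
  induction parts with
  | nil => exact absurd rfl hne
  | cons p ps ih =>
    cases ps with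
    | nil =>
      have h1 : PySem.Chars.join ['.'] [p] = p ++ [] := by
        simp [PySem.Chars.join, List.intercalate]
      rw [h1, pvSplit_append_nodot p [] (hnd p (by simp))]
      simp [pvSplit, pvConsHead]
    | cons q qs =>
      have hj : PySem.Chars.join ['.'] (p :: q :: qs)
          = p ++ '.' :: PySem.Chars.join ['.'] (q :: qs) := by
        simp [PySem.Chars.join, List.intercalate]
      rw [hj, pvSplit_append_nodot p _ (hnd p (by simp))]
      have h2 : pvSplit ('.' :: PySem.Chars.join ['.'] (q :: qs)) = [] :: (q :: qs) := by
        rw [pvSplit, if_pos rfl, ih (by simp) (fun x hx => hnd x (by simp [hx]))]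
      rw [h2, pvConsHead]
      simp

-- every value pvTagDict can hand out is '.'-free
theorem pvTag_nodot (c : String) : '.' ∉ (pvTagDict.getD c "").toList := by
  rcases hg : pvTagDict.get? c with _ | v
  · simp [PySem.Dict.getD, hg]
  · have hm : (c, v) ∈ pvTagDict.items := PySem.Dict.mem_items_of_get?_eq_some _ hg
    have hit : pvTagDict.items
        = [("raspy_edge", "<groan>"), ("ethereal_softness", "<sigh>"), ("commanding_presence", ""),
           ("playful_energy", "<chuckle>"), ("seductive_warmth", "<gasp>"), ("theatrical_projection", ""),
           ("hypnotic_quality", "<yawn>"), ("mysterious_depth", "<sigh>")] := by decide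
    rw [hit] at hm
    simp only [PySem.Dict.getD, hg, Option.getD_some]
    simp at hm
    rcases hm with ⟨_, rfl⟩ | ⟨_, rfl⟩ | ⟨_, rfl⟩ | ⟨_, rfl⟩ | ⟨_, rfl⟩ | ⟨_, rfl⟩ | ⟨_, rfl⟩ | ⟨_, rfl⟩ <;> decide

-- A's loop, run from a text whose second sentence already carries prefix q, pushes the
-- collected tags (each followed by a space) in front of q
theorem pvInvariant (cs : List String) (s0 s1 : List Char) (rest : List (List Char))
    (q : List Char) (h0 : '.' ∉ s0) (h1 : '.' ∉ s1) (hq : '.' ∉ q)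
    (hrest : ∀ x ∈ rest, '.' ∉ x) :
    cs.foldl pvStepA (PySem.Chars.join ['.'] (s0 :: (q ++ s1) :: rest))
      = PySem.Chars.join ['.']
          (s0 ::
            (((cs.filter (fun c => pvTagDict.contains c && decide (pvTagDict.getD c "" ≠ ""))).map
                (fun c => (pvTagDict.getD c "").toList)).reverse.flatMap (fun t => t ++ [' '])
              ++ q ++ s1) :: rest) := by
  induction cs generalizing q with
  | nil => simp
  | cons c cs ih =>
    by_cases hc : (pvTagDict.contains c && decide (pvTagDict.getD c "" ≠ "")) = true
    · have hsplit : PySem.Chars.splitOn (PySem.Chars.join ['.'] (s0 :: (q ++ s1) :: rest)) ['.']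
          = s0 :: (q ++ s1) :: rest := by
        rw [pvSplitOn_eq_pvSplit, pvSplit_join]
        · simp
        · intro x hx
          simp only [List.mem_cons] at hx
          rcases hx with h' | h' | h'
          · rw [h']; exact h0
          · rw [h']
            simp only [List.mem_append]; rintro (h'' | h'')
            · exact hq h''
            · exact h1 h''
          · exact hrest x h'
      have hstep : pvStepA (PySem.Chars.join ['.'] (s0 :: (q ++ s1) :: rest)) c
          = PySem.Chars.join ['.']
              (s0 :: (((pvTagDict.getD c "").toList ++ ' ' :: q) ++ s1) :: rest) := by
        simp only [pvStepA, if_pos hc, hsplit]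
        simp [PySem.List.pyGetD, PySem.List.pyGet?, PySem.List.pyIdx?]
      rw [List.foldl_cons, hstep,
        show ((pvTagDict.getD c "").toList ++ ' ' :: q) ++ s1
          = ((pvTagDict.getD c "").toList ++ ' ' :: q) ++ s1 from rfl]
      have hq' : '.' ∉ (pvTagDict.getD c "").toList ++ ' ' :: q := by
        simp only [List.mem_append, List.mem_cons]
        rintro (h' | h' | h')
        · exact pvTag_nodot c h'
        · exact absurd h' (by decide)
        · exact hq h'
      rw [ih _ hq']
      rw [List.filter_cons, if_pos hc]
      simp [List.flatMap_append]
    · have hstep : pvStepA (PySem.Chars.join ['.'] (s0 :: (q ++ s1) :: rest)) c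
          = PySem.Chars.join ['.'] (s0 :: (q ++ s1) :: rest) := by
        simp only [pvStepA, if_neg hc]
      rw [List.foldl_cons, hstep, ih q hq, List.filter_cons, if_neg hc]

theorem pvFlatMap_eq_join_space (ts : List (List Char)) (hne : ts ≠ []) :
    ts.flatMap (fun t => t ++ [' ']) = PySem.Chars.join [' '] ts ++ [' '] := by
  induction ts with
  | nil => exact absurd rfl hne
  | cons t ts ih =>
    cases ts with
    | nil => simp [PySem.Chars.join, List.intercalate]
    | cons u us =>
      rw [List.flatMap_cons, ih (by simp)]
      simp [PySem.Chars.join, List.intercalate]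

-- if the split has at most one piece, every A-step (and hence A's whole loop) is the identity
theorem pvStepA_short (e : List Char) (c : String)
    (h : ¬ (PySem.Chars.splitOn e ['.']).length > 1) : pvStepA e c = e := by
  simp [pvStepA, h]

theorem pvFoldA_short (cs : List String) (e : List Char)
    (h : ¬ (PySem.Chars.splitOn e ['.']).length > 1) : cs.foldl pvStepA e = e := by
  induction cs with
  | nil => rfl
  | cons c cs ih => rw [List.foldl_cons, pvStepA_short e c h, ih]

-- ===== VERDICT (by name: the statement is the Claim_ definition above) =====
theorem add_vocal_characteristic_tags_spec : Claim_equal_add_vocal_characteristic_tags := by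
  intro text vcs _
  unfold Spec_add_vocal_characteristic_tags
  unfold add_vocal_characteristic_tags add_vocal_characteristic_tags_alt
  rcases hs : PySem.Chars.splitOn text.toList ['.'] with _ | ⟨s0, _ | ⟨s1, rest⟩⟩
  · exact absurd (pvSplitOn_eq_pvSplit text.toList ▸ hs) (pvSplit_ne_nil text.toList)
  · -- one piece: both sides return text unchanged
    rw [pvFoldA_short vcs text.toList (by rw [hs]; simp)]
    split
    · exact String.ofList_toList
    · rw [if_pos (by simp)]
      exact String.ofList_toList
  · -- at least two pieces
    have hsp : pvSplit text.toList = s0 :: s1 :: rest := by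
      rw [← pvSplitOn_eq_pvSplit, hs]
    have hnodot : ∀ x ∈ s0 :: s1 :: rest, '.' ∉ x := hsp ▸ pvSplit_nodot text.toList
    have htext : text.toList = PySem.Chars.join ['.'] (s0 :: s1 :: rest) := by
      conv_lhs => rw [← pvJoin_pvSplit text.toList, hsp]
    have hinv := pvInvariant vcs s0 s1 rest [] (hnodot s0 (by simp)) (hnodot s1 (by simp))
      (by simp) (fun x hx => hnodot x (by simp [hx]))
    simp only [List.nil_append, List.append_nil] at hinv
    conv_lhs => rw [htext, hinv]
    by_cases hne : (vcs.filter
        (fun c => pvTagDict.contains c && decide (pvTagDict.getD c "" ≠ ""))).map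
        (fun c => (pvTagDict.getD c "").toList) = []
    · rw [if_pos hne, hne]
      simp only [List.reverse_nil, List.flatMap_nil, List.nil_append]
      rw [← htext]
      exact String.ofList_toList
    · rw [if_neg hne, if_neg (by simp)]
      rw [pvFlatMap_eq_join_space _ (by simpa using hne)]
      simp [PySem.List.pyGetD, PySem.List.pyGet?, PySem.List.pyIdx?]
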